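-- pv_equiv track=rewrite | github.com/ZJU-DAILY/UniView | code/backend/core/parseFilterSpecialCase_SP.py | getFilterValue
-- ===== SOURCE A (Python) =====
-- def getFilterValue(info):
--     value = ""
--     info = info.strip()
--     i = 0
--     stopFlag = 0
--     while i < len(info):
--         if info[i] == '(':
--             stopFlag = stopFlag + 1
--         else:
--             break
--         i = i + 1
--     for ch in info:
--         if ch == ')':
--             if stopFlag != 0:
--                 stopFlag = stopFlag - 1
--             else:
--                 break
--         value = value + ch
--     return value
-- ===== SOURCE B (Python) =====
-- def getFilterValue(info):
--     s = info.strip()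
--     n = len(s) - len(s.lstrip('('))
--     return ')'.join(s.split(')')[:n + 1])
-- ===== Notes on version B (the rewrite author's own statement) =====
-- stated objective: idiomatic
-- what changed: Replaced A's two explicit scans (a while loop counting leading open parens and a char-by-char for loop with a decrementing counter, break, and repeated string concatenation) by computing the leading-paren count via len minus lstrip-length and truncating with one split/join.
import Mathlib
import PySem

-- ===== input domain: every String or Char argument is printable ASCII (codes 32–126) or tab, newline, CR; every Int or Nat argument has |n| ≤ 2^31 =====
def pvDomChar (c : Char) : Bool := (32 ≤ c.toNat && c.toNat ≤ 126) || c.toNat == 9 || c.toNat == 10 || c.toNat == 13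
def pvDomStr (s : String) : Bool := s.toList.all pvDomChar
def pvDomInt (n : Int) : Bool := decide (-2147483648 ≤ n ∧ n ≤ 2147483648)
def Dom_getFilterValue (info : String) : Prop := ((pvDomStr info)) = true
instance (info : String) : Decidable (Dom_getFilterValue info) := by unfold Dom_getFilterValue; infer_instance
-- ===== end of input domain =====

-- B replaces A's two counter-driven scans with a leading-'(' count plus split/join truncation (idiomatic, same cost).


-- ===== PORT A =====
-- A's while loop: scan from the front while info[i] == '(', incrementing stopFlag; break otherwise.
def pvCountA : List Char → Nat → Nat
  | [], k => k
  | c :: cs, k => if c = '(' then pvCountA cs (k + 1) else k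

-- A's for loop: append each char to value; at ')' decrement stopFlag if nonzero, else break.
def pvForA : List Char → Nat → List Char → List Char
  | [], _, value => value
  | ch :: cs, k, value =>
    if ch = ')' then
      if k ≠ 0 then pvForA cs (k - 1) (value ++ [ch]) else value
    else pvForA cs k (value ++ [ch])

def getFilterValue (info : String) : String :=
  let s := (PySem.Str.strip info).toList
  String.ofList (pvForA s (pvCountA s 0) [])

-- ===== PORT B =====
-- n = len(s) - len(s.lstrip('(')): lstrip('(') ported by hand as dropWhile (· = '('), exact since it
-- removes exactly the leading characters drawn from the set {'('}.
-- s.split(')')[:n+1] : the slice with a nonnegative upper bound is List.take (n+1).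
def getFilterValue_alt (info : String) : String :=
  let s := (PySem.Str.strip info).toList
  let n := s.length - (s.dropWhile (· = '(')).length
  String.ofList (PySem.Chars.join [')'] ((PySem.Chars.splitOn s [')']).take (n + 1)))

-- ===== PRECONDITION & SPEC =====
def Spec_getFilterValue (info : String) (out : String) : Prop := out = getFilterValue_alt info
instance (info : String) (out : String) : Decidable (Spec_getFilterValue info out) := by unfold Spec_getFilterValue; infer_instance

-- ===== CLAIM (what is proved, stated in full; the proofs are below) =====
def Claim_equal_getFilterValue : Prop := ∀ (info : String), Dom_getFilterValue info → Spec_getFilterValue info (getFilterValue info)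

-- ===== LEMMAS AND PROOFS =====

-- Structural model of splitting on ')' (cur holds the current segment reversed).
def pvSplit : List Char → List Char → List (List Char)
  | [], cur => [cur.reverse]
  | c :: rest, cur => if c = ')' then cur.reverse :: pvSplit rest [] else pvSplit rest (c :: cur)

theorem pvSplit_ne_nil (l cur : List Char) : pvSplit l cur ≠ [] := by
  cases l with
  | nil => simp [pvSplit]
  | cons c rest =>
    simp only [pvSplit]
    split
    · simp
    · exact pvSplit_ne_nil rest (c :: cur)

-- PySem's fuel-based splitOn.go agrees with pvSplit when the fuel suffices.
theorem pvGo_eq (l : List Char) : ∀ (fuel : Nat) (cur : List Char) (acc : List (List Char)), l.length < fuel →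
    PySem.Chars.splitOn.go [')'] fuel l cur acc = acc.reverse ++ pvSplit l cur := by
  induction l with
  | nil =>
    intro fuel cur acc h
    match fuel with
    | f + 1 => rw [PySem.Chars.splitOn.go.eq_def]; simp [pvSplit]
  | cons c rest ih =>
    intro fuel cur acc h
    match fuel with
    | f + 1 =>
      have hf : rest.length < f := by simpa using h
      by_cases hc : c = ')'
      · subst hc
        have hpre : List.isPrefixOf [')'] (')' :: rest) = true := by
          simp [List.isPrefixOf]
        rw [PySem.Chars.splitOn.go.eq_def]
        simp only [hpre, if_true, List.length_cons, List.length_nil, List.drop_succ_cons,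
          List.drop_zero]
        rw [ih f [] (cur.reverse :: acc) hf]
        simp [pvSplit]
      · have hpre : List.isPrefixOf [')'] (c :: rest) = false := by
          simp [List.isPrefixOf]
          exact fun h' => hc h'.symm
        rw [PySem.Chars.splitOn.go.eq_def]
        simp only [hpre, Bool.false_eq_true, if_false]
        rw [ih f (c :: cur) acc hf]
        simp [pvSplit, hc]

theorem pvSplitOn_eq (l : List Char) : PySem.Chars.splitOn l [')'] = pvSplit l [] := by
  unfold PySem.Chars.splitOn
  rw [pvGo_eq l (l.length + 1) [] [] (by omega)]
  simp

-- Starting pvSplit with a pending segment prefixes it onto the first piece.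
theorem pvSplit_cur (l : List Char) : ∀ cur : List Char,
    pvSplit l cur = (pvSplit l []).modifyHead (cur.reverse ++ ·) := by
  induction l with
  | nil => intro cur; simp [pvSplit]
  | cons c rest ih =>
    intro cur
    by_cases hc : c = ')'
    · subst hc; simp [pvSplit]
    · simp only [pvSplit, if_neg hc]
      rw [ih (c :: cur), ih [c]]
      obtain ⟨h, t, ht⟩ : ∃ h t, pvSplit rest [] = h :: t := by
        cases hs : pvSplit rest [] with
        | nil => exact absurd hs (pvSplit_ne_nil rest [])
        | cons h t => exact ⟨h, t, rfl⟩
      simp [ht]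

-- The heart of the equivalence: A's for loop produces exactly ')'.join of the first k+1 pieces.
theorem pvForA_eq (cs : List Char) : ∀ (k : Nat) (acc : List Char),
    pvForA cs k acc = acc ++ PySem.Chars.join [')'] ((pvSplit cs []).take (k + 1)) := by
  induction cs with
  | nil => intro k acc; simp [pvForA, pvSplit, PySem.Chars.join, List.intercalate]
  | cons c rest ih =>
    intro k acc
    by_cases hc : c = ')'
    · subst hc
      simp only [pvForA, pvSplit, if_true, List.reverse_nil]
      match k with
      | 0 => simp [PySem.Chars.join, List.intercalate]
      | k' + 1 =>
        simp only [Nat.succ_ne_zero, ne_eq, not_false_iff, if_true, Nat.add_sub_cancel]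
        rw [ih k' (acc ++ [')'])]
        obtain ⟨h, t, ht⟩ : ∃ h t, pvSplit rest [] = h :: t := by
          cases hs : pvSplit rest [] with
          | nil => exact absurd hs (pvSplit_ne_nil rest [])
          | cons h t => exact ⟨h, t, rfl⟩
        simp [ht, PySem.Chars.join, List.intercalate]
    · simp only [pvForA, if_neg hc, pvSplit]
      rw [ih k (acc ++ [c]), pvSplit_cur rest [c]]
      obtain ⟨h, t, ht⟩ : ∃ h t, pvSplit rest [] = h :: t := by
        cases hs : pvSplit rest [] with
        | nil => exact absurd hs (pvSplit_ne_nil rest [])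
        | cons h t => exact ⟨h, t, rfl⟩
      cases t with
      | nil => simp [ht, PySem.Chars.join, List.intercalate]
      | cons h' t' =>
        match k with
        | 0 => simp [ht, PySem.Chars.join, List.intercalate]
        | k' + 1 => simp [ht, PySem.Chars.join, List.intercalate]

-- A's while loop counts the leading '(' run.
theorem pvCountA_eq (cs : List Char) : ∀ k : Nat,
    pvCountA cs k = k + (cs.takeWhile (· = '(')).length := by
  induction cs with
  | nil => intro k; simp [pvCountA]
  | cons c rest ih =>
    intro k
    by_cases hc : c = '('
    · subst hc
      simp only [pvCountA, if_true]
      rw [ih (k + 1)]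
      simp [List.takeWhile]
      omega
    · simp [pvCountA, hc, List.takeWhile]

theorem pvLen_sub (cs : List Char) :
    cs.length - (cs.dropWhile (· = '(')).length = (cs.takeWhile (· = '(')).length := by
  have h := congrArg List.length (List.takeWhile_append_dropWhile (p := fun c => decide (c = '(')) (l := cs))
  simp only [List.length_append] at h
  omega

-- ===== VERDICT (by name: the statement is the Claim_ definition above) =====
theorem getFilterValue_spec : Claim_equal_getFilterValue := by
  intro info _
  unfold Spec_getFilterValue getFilterValue getFilterValue_alt
  simp only [pvSplitOn_eq, pvLen_sub]
  rw [pvForA_eq, pvCountA_eq]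
  simp
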